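-- pv_equiv track=rewrite | github.com/gamenet/redis-memory-analyzer | rma/lcs.py | check
-- ===== SOURCE A (Python) =====
-- def check(string, seq):
--     i = 0
--     j = 0
--     while i < len(string) and j < len(seq):
--         if string[i] == seq[j]:
--             j += 1
--         i += 1
--     return len(seq) - j
-- ===== SOURCE B (Python) =====
-- def check(string, seq):
--     # Inverted index: for each character its (increasing) positions in string.
--     pos = {}
--     for i, c in enumerate(string):
--         pos.setdefault(c, []).append(i)
--     cur = -1
--     j = 0
--     for ch in seq:
--         lst = pos.get(ch, [])
--         # binary search: first index lo with lst[lo] > cur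
--         lo, hi = 0, len(lst)
--         while lo < hi:
--             mid = (lo + hi) // 2
--             if lst[mid] > cur:
--                 hi = mid
--             else:
--                 lo = mid + 1
--         if lo == len(lst):
--             break
--         cur = lst[lo]
--         j += 1
--     return len(seq) - j
-- ===== Notes on version B (the rewrite author's own statement) =====
-- stated objective: alternative
-- what changed: B precomputes an inverted index (dict: character -> increasing list of its positions in string) and matches each seq character by a hand-rolled binary search for the first indexed position after the previous match, instead of A's two integer pointers walking string and seq in lockstep.
import Mathlib
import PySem

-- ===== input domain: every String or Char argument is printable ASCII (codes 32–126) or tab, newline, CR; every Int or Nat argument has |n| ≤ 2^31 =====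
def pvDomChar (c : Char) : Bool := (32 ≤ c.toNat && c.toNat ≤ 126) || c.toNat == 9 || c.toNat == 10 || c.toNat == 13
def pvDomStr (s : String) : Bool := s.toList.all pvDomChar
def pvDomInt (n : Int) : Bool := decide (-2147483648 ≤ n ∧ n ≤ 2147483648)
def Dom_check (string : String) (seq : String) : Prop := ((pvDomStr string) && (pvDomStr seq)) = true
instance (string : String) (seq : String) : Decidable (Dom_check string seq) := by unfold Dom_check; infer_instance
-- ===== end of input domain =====

-- B replaces A's two-pointer walk over string by an inverted index (dict: char -> increasing
-- list of its positions in string) queried with a hand-rolled binary search per seq character;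
-- an alternative algorithm of similar cost, not claimed faster.

-- ===== PORT A =====
-- A's while loop: i walks string, j walks seq; modelled by structural recursion on the
-- trailing parts of string/seq (advancing i drops a char of string; advancing j drops a
-- char of seq). Returns j, the number of matched characters.
def checkLoopA : List Char → List Char → Nat
  | [], _ => 0
  | _ :: _, [] => 0
  | c :: s', d :: q' => if c = d then 1 + checkLoopA s' q' else checkLoopA s' (d :: q')

def check (string : String) (seq : String) : Int :=
  (seq.toList.length : Int) - (checkLoopA string.toList seq.toList : Int)

-- ===== PORT B =====
-- pos = {}; for i, c in enumerate(string): pos.setdefault(c, []).append(i)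
-- (setdefault-then-append == insert c (current list, default [], with i appended))
def posIndex (s : List Char) : PySem.Dict Char (List Int) :=
  (PySem.List.enumerate s 0).foldl
    (fun d p => d.insert p.2 (d.getD p.2 [] ++ [p.1])) PySem.Dict.empty

-- the while lo < hi binary search; lst[mid] is always in range (hi ≤ len lst at every
-- call), so getD mid 0 is exact here
def bsearchB (lst : List Int) (cur : Int) (lo hi : Nat) : Nat :=
  if h : lo < hi then
    let mid := (lo + hi) / 2
    if cur < lst.getD mid 0 then bsearchB lst cur lo mid
    else bsearchB lst cur (mid + 1) hi
  else lo
termination_by hi - lo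
decreasing_by all_goals omega

-- the for ch in seq loop (break modelled by stopping the recursion); returns j.
-- lst[lo] is in range in the taken branch (lo ≠ len lst), so getD lo 0 is exact here
def bLoop (pos : PySem.Dict Char (List Int)) : List Char → Int → Nat
  | [], _ => 0
  | ch :: rest, cur =>
    let lst := pos.getD ch []
    let lo := bsearchB lst cur 0 lst.length
    if lo = lst.length then 0
    else 1 + bLoop pos rest (lst.getD lo 0)

def check_alt (string : String) (seq : String) : Int :=
  (seq.toList.length : Int) - (bLoop (posIndex string.toList) seq.toList (-1) : Int)

-- ===== PRECONDITION & SPEC =====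
def Spec_check (string : String) (seq : String) (out : Int) : Prop := out = check_alt string seq
instance (string : String) (seq : String) (out : Int) : Decidable (Spec_check string seq out) := by unfold Spec_check; infer_instance

-- ===== CLAIM (what is proved, stated in full; the proofs are below) =====
def Claim_equal_check : Prop := ∀ (string : String) (seq : String), Dom_check string seq → Spec_check string seq (check string seq)

-- ===== LEMMAS AND PROOFS =====

-- positions (as Int, offset n) of c in s
def posFrom (c : Char) : List Char → Int → List Int
  | [], _ => []
  | x :: s, n => if x = c then n :: posFrom c s (n + 1) else posFrom c s (n + 1)

-- index of the first occurrence of c in t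
def firstIdx (c : Char) : List Char → Option Nat
  | [] => none
  | x :: t => if x = c then some 0 else (firstIdx c t).map (· + 1)

-- first element of lst strictly greater than cur (in list order)
def firstGT (lst : List Int) (cur : Int) : Option Int :=
  match lst with
  | [] => none
  | p :: l => if cur < p then some p else firstGT l cur

theorem checkLoopA_nil_seq : ∀ s : List Char, checkLoopA s [] = 0 := by
  intro s; cases s <;> rfl

theorem checkLoopA_cons (ch : Char) (q : List Char) :
    ∀ t : List Char, checkLoopA t (ch :: q) =
      match firstIdx ch t with
      | none => 0
      | some k => 1 + checkLoopA (t.drop (k + 1)) q := by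
  intro t
  induction t with
  | nil => simp [checkLoopA, firstIdx]
  | cons x t' ih =>
    by_cases h : x = ch
    · simp [checkLoopA, firstIdx, h]
    · simp only [checkLoopA, firstIdx, if_neg h, ih]
      cases firstIdx ch t' <;> simp

theorem build_getD (step : PySem.Dict Char (List Int) → Int × Char → PySem.Dict Char (List Int))
    (hstep : step = fun d p => d.insert p.2 (d.getD p.2 [] ++ [p.1])) :
    ∀ (s : List Char) (n : Int) (d : PySem.Dict Char (List Int)) (c : Char),
      ((PySem.List.enumerate s n).foldl step d).getD c [] = d.getD c [] ++ posFrom c s n := by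
  intro s
  induction s with
  | nil => intro n d c; simp [PySem.List.enumerate_nil, posFrom]
  | cons x s' ih =>
    intro n d c
    rw [PySem.List.enumerate_cons, List.foldl_cons, ih]
    by_cases h : c = x
    · subst h
      simp [hstep, posFrom, PySem.Dict.getD_insert_self]
    · simp [hstep, posFrom, PySem.Dict.getD_insert, h, if_neg (Ne.symm h)]

theorem posIndex_getD (s : List Char) (c : Char) :
    (posIndex s).getD c [] = posFrom c s 0 := by
  unfold posIndex
  rw [build_getD _ rfl]
  simp [PySem.Dict.getD, PySem.Dict.get?, PySem.Dict.empty]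

theorem posFrom_mem_le (c : Char) : ∀ (s : List Char) (n : Int) (p : Int),
    p ∈ posFrom c s n → n ≤ p := by
  intro s
  induction s with
  | nil => intro n p hp; simp [posFrom] at hp
  | cons x s' ih =>
    intro n p hp
    by_cases h : x = c
    · simp [posFrom, h] at hp
      rcases hp with rfl | hp
      · omega
      · have := ih _ _ hp; omega
    · simp [posFrom, h] at hp
      have := ih _ _ hp; omega

theorem posFrom_pairwise (c : Char) : ∀ (s : List Char) (n : Int),
    (posFrom c s n).Pairwise (· < ·) := by
  intro s
  induction s with
  | nil => intro n; simp [posFrom]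
  | cons x s' ih =>
    intro n
    by_cases h : x = c
    · simp only [posFrom, if_pos h]
      refine List.pairwise_cons.2 ⟨?_, ih _⟩
      intro p hp
      have := posFrom_mem_le c s' (n + 1) p hp; omega
    · simp only [posFrom, if_neg h]; exact ih _

theorem posFrom_succ (c : Char) : ∀ (s : List Char) (n : Int),
    posFrom c s (n + 1) = (posFrom c s n).map (· + 1) := by
  intro s
  induction s with
  | nil => intro n; simp [posFrom]
  | cons x s' ih =>
    intro n
    by_cases h : x = c <;> simp [posFrom, h, ih]

theorem firstGT_map_add_one (lst : List Int) (cur : Int) :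
    firstGT (lst.map (· + 1)) cur = (firstGT lst (cur - 1)).map (· + 1) := by
  induction lst with
  | nil => simp [firstGT]
  | cons p l ih =>
    by_cases h : cur - 1 < p
    · simp [firstGT, h, show cur < p + 1 by omega]
    · simp [firstGT, h, show ¬ cur < p + 1 by omega, ih]

theorem firstGT_of_all_gt (lst : List Int) (cur cur' : Int)
    (h : ∀ p ∈ lst, 0 ≤ p) (h1 : cur < 0) (h2 : cur' < 0) :
    firstGT lst cur = firstGT lst cur' := by
  cases lst with
  | nil => rfl
  | cons p l =>
    have hp := h p (by simp)
    simp [firstGT, show cur < p by omega, show cur' < p by omega]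

theorem firstGT_posFrom (c : Char) : ∀ (s : List Char) (cur : Int), -1 ≤ cur →
    firstGT (posFrom c s 0) cur =
      (firstIdx c (s.drop (cur + 1).toNat)).map (fun k => (k : Int) + cur + 1) := by
  intro s
  induction s with
  | nil => intro cur _; simp [posFrom, firstGT, firstIdx]
  | cons x s' ih =>
    intro cur hcur
    have hnn : ∀ p ∈ posFrom c s' 0, 0 ≤ p := fun p hp => posFrom_mem_le c s' 0 p hp
    have hshift : posFrom c s' (0 + 1) = (posFrom c s' 0).map (· + 1) := posFrom_succ c s' 0
    by_cases hcur0 : cur < 0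
    · have hc : cur = -1 := by omega
      subst hc
      by_cases h : x = c
      · simp [posFrom, h, firstGT, firstIdx]
      · have hx : posFrom c (x :: s') 0 = (posFrom c s' 0).map (· + 1) := by
          rw [show posFrom c (x :: s') 0 = posFrom c s' (0 + 1) from by simp [posFrom, h], hshift]
        rw [hx, firstGT_map_add_one,
          firstGT_of_all_gt _ _ (-1) hnn (by omega) (by omega), ih (-1) (by omega)]
        norm_num [firstIdx, h]
        cases firstIdx c s' <;> simp
    · have ht : (cur + 1).toNat = cur.toNat + 1 := by omega
      have h3 := ih (cur - 1) (by omega)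
      rw [show (cur - 1 + 1).toNat = cur.toNat by omega] at h3
      by_cases h : x = c
      · have hx : posFrom c (x :: s') 0 = 0 :: (posFrom c s' 0).map (· + 1) := by
          rw [show posFrom c (x :: s') 0 = 0 :: posFrom c s' (0 + 1) from by simp [posFrom, h], hshift]
        rw [hx, show firstGT (0 :: (posFrom c s' 0).map (· + 1)) cur
            = firstGT ((posFrom c s' 0).map (· + 1)) cur from by
              simp [firstGT, show ¬ cur < 0 from hcur0],
          firstGT_map_add_one, h3, ht, List.drop_succ_cons]
        cases firstIdx c (s'.drop cur.toNat) <;> (simp; try omega)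
      · have hx : posFrom c (x :: s') 0 = (posFrom c s' 0).map (· + 1) := by
          rw [show posFrom c (x :: s') 0 = posFrom c s' (0 + 1) from by simp [posFrom, h], hshift]
        rw [hx, firstGT_map_add_one, h3, ht, List.drop_succ_cons]
        cases firstIdx c (s'.drop cur.toNat) <;> (simp; try omega)

theorem bsearchB_inv (lst : List Int) (cur : Int)
    (hmono : ∀ i j, i ≤ j → j < lst.length → lst.getD i 0 ≤ lst.getD j 0) :
    ∀ (lo hi : Nat), lo ≤ hi → hi ≤ lst.length →
      (∀ i < lo, lst.getD i 0 ≤ cur) →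
      (∀ i, hi ≤ i → i < lst.length → cur < lst.getD i 0) →
      bsearchB lst cur lo hi ≤ lst.length ∧
      (∀ i < bsearchB lst cur lo hi, lst.getD i 0 ≤ cur) ∧
      (∀ i, bsearchB lst cur lo hi ≤ i → i < lst.length → cur < lst.getD i 0) := by
  intro lo hi
  fun_induction bsearchB lst cur lo hi with
  | case1 lo hi h mid hmid ih =>
    intro _ hhi hlow hhigh
    refine ih (by omega) (by omega) hlow ?_
    intro i hi1 hi2
    exact lt_of_lt_of_le hmid (hmono mid i (by omega) hi2)
  | case2 lo hi h mid hmid ih =>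
    intro _ hhi hlow hhigh
    refine ih (by omega) hhi ?_ hhigh
    intro i hilt
    rcases Nat.lt_or_ge i mid with hi' | hi'
    · exact le_trans (hmono i mid (by omega) (by omega)) (not_lt.1 hmid)
    · have : i = mid := by omega
      subst this; exact not_lt.1 hmid
  | case3 lo hi h =>
    intro hle hhi hlow hhigh
    have heq : lo = hi := by omega
    subst heq
    exact ⟨by omega, hlow, hhigh⟩

theorem firstGT_of_inv (lst : List Int) (cur : Int) :
    ∀ r : Nat, r ≤ lst.length →
      (∀ i < r, lst.getD i 0 ≤ cur) →
      (∀ i, r ≤ i → i < lst.length → cur < lst.getD i 0) →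
      firstGT lst cur = if r < lst.length then some (lst.getD r 0) else none := by
  induction lst with
  | nil => intro r h _ _; simp [firstGT]
  | cons p l ih =>
    intro r hr hlow hhigh
    cases r with
    | zero =>
      have : cur < p := by simpa using hhigh 0 (by omega) (by simp)
      simp [firstGT, this]
    | succ r' =>
      have hp : p ≤ cur := by simpa using hlow 0 (by omega)
      simp only [firstGT, if_neg (not_lt.2 hp)]
      rw [ih r' (by simpa using hr)
          (fun i hi => by simpa using hlow (i + 1) (by omega))
          (fun i h1 h2 => by simpa using hhigh (i + 1) (by omega) (by simpa using h2))]
      simp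

theorem bLoop_eq (s : List Char) : ∀ (q : List Char) (cur : Int), -1 ≤ cur →
    bLoop (posIndex s) q cur = checkLoopA (s.drop (cur + 1).toNat) q := by
  intro q
  induction q with
  | nil => intro cur _; simp [bLoop, checkLoopA_nil_seq]
  | cons ch rest ih =>
    intro cur hcur
    have hpw : (posFrom ch s 0).Pairwise (· < ·) := posFrom_pairwise ch s 0
    have hmono : ∀ i j, i ≤ j → j < (posFrom ch s 0).length →
        (posFrom ch s 0).getD i 0 ≤ (posFrom ch s 0).getD j 0 := by
      intro i j hij hj
      rcases Nat.eq_or_lt_of_le hij with rfl | hlt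
      · exact le_refl _
      · have := (List.pairwise_iff_getElem.1 hpw) i j (by omega) hj hlt
        rw [List.getD_eq_getElem _ _ (by omega), List.getD_eq_getElem _ _ hj]
        omega
    obtain ⟨hr1, hr2, hr3⟩ := bsearchB_inv (posFrom ch s 0) cur hmono 0
      (posFrom ch s 0).length (by omega) (le_refl _) (by omega) (by omega)
    have hft := firstGT_of_inv (posFrom ch s 0) cur _ hr1 hr2 hr3
    rw [firstGT_posFrom ch s cur hcur] at hft
    rw [checkLoopA_cons]
    simp only [bLoop, posIndex_getD]
    set r := bsearchB (posFrom ch s 0) cur 0 (posFrom ch s 0).length with hrdef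
    by_cases hrl : r = (posFrom ch s 0).length
    · rw [if_pos hrl]
      rw [if_neg (by omega : ¬ r < (posFrom ch s 0).length)] at hft
      cases hf : firstIdx ch (s.drop (cur + 1).toNat) with
      | none => rfl
      | some k => rw [hf] at hft; simp at hft
    · rw [if_neg hrl]
      rw [if_pos (by omega : r < (posFrom ch s 0).length)] at hft
      cases hf : firstIdx ch (s.drop (cur + 1).toNat) with
      | none => rw [hf] at hft; simp at hft
      | some k =>
        rw [hf] at hft
        simp at hft
        rw [← List.getD_eq_getElem?_getD] at hft
        rw [← hft, ih (↑k + cur + 1) (by omega),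
          show ((↑k + cur + 1 + 1 : ℤ)).toNat = (cur + 1).toNat + (k + 1) by omega,
          ← List.drop_drop]

-- ===== VERDICT (by name: the statement is the Claim_ definition above) =====
theorem check_spec : Claim_equal_check := by
  intro string seq _
  unfold Spec_check check check_alt
  rw [bLoop_eq string.toList seq.toList (-1) (by omega)]
  norm_num
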